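-- pv_equiv track=rewrite | github.com/kubernetes/test-infra | config/jobs/kubernetes/kops/helpers.py | replace_or_remove_line
-- ===== SOURCE A (Python) =====
-- def replace_or_remove_line(s, pattern, new_str):
--     keep = []
--     for line in s.split('\n'):
--         if pattern in line:
--             if new_str:
--                 line = line.replace(pattern, new_str)
--                 keep.append(line)
--         else:
--             keep.append(line)
--     return '\n'.join(keep)
-- ===== SOURCE B (Python) =====
-- def replace_or_remove_line(s, pattern, new_str):
--     if '\n' in pattern:
--         # no single line can contain a newline, so no line matches: s is unchanged
--         return s
--     if new_str:
--         # per-line replacement of a newline-free pattern is one whole-string replace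
--         return s.replace(pattern, new_str)
--     # removal: scan the raw string with partition, never materializing s.split('\n')
--     out = []
--     rest = s
--     while True:
--         head, sep, rest = rest.partition('\n')
--         if pattern not in head:
--             out.append(head)
--         if not sep:
--             return '\n'.join(out)
-- ===== Notes on version B (the rewrite author's own statement) =====
-- stated objective: alternative
-- what changed: B never iterates over s.split('\n'): it returns s unchanged when the pattern contains a newline (no line can match), performs ONE whole-string str.replace when new_str is truthy (per-line replacement of a newline-free pattern equals whole-string replacement), and in the removal case scans the raw string with partition('\n'), never building the full line list A splits out.
import Mathlib
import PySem

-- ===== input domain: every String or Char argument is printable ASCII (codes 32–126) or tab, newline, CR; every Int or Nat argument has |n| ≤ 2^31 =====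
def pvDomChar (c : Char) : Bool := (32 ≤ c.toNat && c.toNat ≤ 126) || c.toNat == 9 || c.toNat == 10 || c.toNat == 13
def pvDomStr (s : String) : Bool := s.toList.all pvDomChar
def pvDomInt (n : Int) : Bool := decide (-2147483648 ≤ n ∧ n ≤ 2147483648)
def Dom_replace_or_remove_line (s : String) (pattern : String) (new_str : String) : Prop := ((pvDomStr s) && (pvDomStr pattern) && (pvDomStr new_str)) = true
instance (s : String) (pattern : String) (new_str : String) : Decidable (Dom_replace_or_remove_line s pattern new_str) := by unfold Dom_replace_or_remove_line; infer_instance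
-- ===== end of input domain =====

-- B avoids A's loop over s.split('\n'): it returns s unchanged when the pattern contains a
-- newline, does ONE whole-string replace when new_str is truthy, and in the removal case
-- scans the raw string with partition('\n'). Same result, different algorithm.

-- ===== PORT A =====
-- A's loop over s.split('\n') with accumulator `keep`, nested branches in A's order.
def replace_or_remove_line (s : String) (pattern : String) (new_str : String) : String :=
  let keep := ((PySem.Str.split? s "\n").getD []).foldl
    (fun keep line =>
      if PySem.Str.isIn pattern line then
        if new_str ≠ "" then keep ++ [PySem.Str.replace line pattern new_str] else keep
      else keep ++ [line]) []
  PySem.Str.join "\n" keep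

-- ===== PORT B =====
-- B's while loop over rest.partition('\n') with accumulator `out`; for the one-character
-- separator '\n', partition's head is exactly takeWhile (· ≠ '\n') and sep is empty iff
-- dropWhile (· ≠ '\n') is empty — this hand port of str.partition is exact.
def pvKeptLines (p : List Char) (rest : List Char) (out : List (List Char)) : List (List Char) :=
  let head := rest.takeWhile (fun c => c ≠ '\n')
  let out' := if PySem.Chars.isIn p head then out else out ++ [head]
  match hd : rest.dropWhile (fun c => c ≠ '\n') with
  | [] => out'
  | _ :: tail => pvKeptLines p tail out'
termination_by rest.length
decreasing_by
  have h1 : (rest.dropWhile (fun c => c ≠ '\n')).length ≤ rest.length :=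
    (List.dropWhile_sublist _).length_le
  rw [hd] at h1
  simp at h1
  omega

def replace_or_remove_line_alt (s : String) (pattern : String) (new_str : String) : String :=
  if PySem.Str.isIn "\n" pattern then s
  else if new_str ≠ "" then PySem.Str.replace s pattern new_str
  else PySem.Str.join "\n" ((pvKeptLines pattern.toList s.toList []).map String.ofList)

-- ===== PRECONDITION & SPEC =====
def Spec_replace_or_remove_line (s : String) (pattern : String) (new_str : String) (out : String) : Prop := out = replace_or_remove_line_alt s pattern new_str
instance (s : String) (pattern : String) (new_str : String) (out : String) : Decidable (Spec_replace_or_remove_line s pattern new_str out) := by unfold Spec_replace_or_remove_line; infer_instance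

-- ===== CLAIM (what is proved, stated in full; the proofs are below) =====
def Claim_equal_replace_or_remove_line : Prop := ∀ (s : String) (pattern : String) (new_str : String), Dom_replace_or_remove_line s pattern new_str → Spec_replace_or_remove_line s pattern new_str (replace_or_remove_line s pattern new_str)

-- ===== LEMMAS AND PROOFS =====

-- proof-side reference splitter: PySem.Chars.splitOn · ['\n'] without fuel or accumulators
def pvSplit (cur : List Char) : List Char → List (List Char)
  | [] => [cur.reverse]
  | c :: t => if c = '\n' then cur.reverse :: pvSplit [] t else pvSplit (c :: cur) t

theorem pvSplit_ne_nil (cur l : List Char) : pvSplit cur l ≠ [] := by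
  induction l generalizing cur with
  | nil => simp [pvSplit]
  | cons c t ih => by_cases h : c = '\n' <;> simp [pvSplit, h, ih]

-- splitOn.go with enough fuel is pvSplit
theorem pv_splitOn_go (fuel : Nat) : ∀ (l cur : List Char) (acc : List (List Char)),
    l.length < fuel →
    PySem.Chars.splitOn.go ['\n'] fuel l cur acc = acc.reverse ++ pvSplit cur l := by
  induction fuel with
  | zero => intro l cur acc h; omega
  | succ fuel ih =>
    intro l cur acc h
    cases l with
    | nil => simp [PySem.Chars.splitOn.go, pvSplit]
    | cons c t =>
      by_cases hc : c = '\n'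
      · subst hc
        simp only [PySem.Chars.splitOn.go]
        rw [if_pos (by simp)]
        simp only [List.length_singleton, List.drop_succ_cons, List.drop_zero]
        rw [ih t [] (cur.reverse :: acc) (by simpa using Nat.lt_of_succ_lt_succ h)]
        simp [pvSplit]
      · simp only [PySem.Chars.splitOn.go, pvSplit]
        rw [if_neg (by simp [List.isPrefixOf]; exact Ne.symm hc), if_neg hc,
          ih t (c :: cur) acc (by simpa using Nat.lt_of_succ_lt_succ h)]

theorem pv_split_eq (s : List Char) : PySem.Chars.splitOn s ['\n'] = pvSplit [] s := by
  simpa using pv_splitOn_go (s.length + 1) s [] [] (by omega)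

-- pvSplit facts
theorem pvSplit_no_nl (cur l : List Char) (hc : '\n' ∉ cur) :
    ∀ x ∈ pvSplit cur l, '\n' ∉ x := by
  induction l generalizing cur with
  | nil => simpa [pvSplit] using hc
  | cons c t ih =>
    by_cases h : c = '\n'
    · subst h
      intro x hx
      rcases (List.mem_cons).mp (by simpa [pvSplit] using hx) with rfl | hx'
      · simpa using hc
      · exact ih [] (by simp) x hx'
    · simp only [pvSplit, if_neg h]
      exact ih (c :: cur) (by simp [hc, Ne.symm h])

theorem pvSplit_of_no_nl (cur l : List Char) (h : '\n' ∉ l) :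
    pvSplit cur l = [cur.reverse ++ l] := by
  induction l generalizing cur with
  | nil => simp [pvSplit]
  | cons c t ih =>
    have hc : ¬ c = '\n' := fun hh => h (hh ▸ List.mem_cons_self)
    simp only [pvSplit, if_neg hc]
    rw [ih (c :: cur) (fun hm => h (List.mem_cons_of_mem _ hm))]
    simp

theorem pvSplit_append_nl (a : List Char) : ∀ (b cur : List Char), '\n' ∉ a →
    pvSplit cur (a ++ '\n' :: b) = (cur.reverse ++ a) :: pvSplit [] b := by
  induction a with
  | nil => intro b cur _; simp [pvSplit]
  | cons c t ih =>
    intro b cur ha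
    have hc : ¬ c = '\n' := fun hh => ha (hh ▸ List.mem_cons_self)
    simp only [List.cons_append, pvSplit, if_neg hc]
    rw [ih b (c :: cur) (fun hm => ha (List.mem_cons_of_mem _ hm))]
    simp

-- join over ['\n'] (a tiny intercalate computation, specialized to our separator)
theorem pv_join_cons (x y : List Char) (ys : List (List Char)) :
    PySem.Chars.join ['\n'] (x :: y :: ys) = x ++ '\n' :: PySem.Chars.join ['\n'] (y :: ys) := by
  simp [PySem.Chars.join, List.intercalate, List.intersperse]

theorem pv_join_pvSplit (l : List Char) : ∀ cur,
    PySem.Chars.join ['\n'] (pvSplit cur l) = cur.reverse ++ l := by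
  induction l with
  | nil => intro cur; simp [pvSplit, PySem.Chars.join, List.intercalate]
  | cons c t ih =>
    intro cur
    by_cases h : c = '\n'
    · subst h
      rw [show pvSplit cur ('\n' :: t) = cur.reverse :: pvSplit [] t by simp [pvSplit]]
      obtain ⟨y, ys, hy⟩ := List.exists_cons_of_ne_nil (pvSplit_ne_nil [] t)
      have h2 := ih ([] : List Char)
      rw [hy] at h2 ⊢
      rw [pv_join_cons, h2]
      simp
    · simp only [pvSplit, if_neg h]
      rw [ih (c :: cur)]
      simp

-- split a list at its first '\n'
theorem pv_first_nl (l : List Char) (h : '\n' ∈ l) :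
    ∃ a b, l = a ++ '\n' :: b ∧ '\n' ∉ a := by
  induction l with
  | nil => simp at h
  | cons c t ih =>
    by_cases hc : c = '\n'
    · exact ⟨[], t, by simp [hc], by simp⟩
    · obtain ⟨a, b, hab, hna⟩ := ih (by rcases List.mem_cons.mp h with h' | h' <;> [exact absurd h'.symm hc; exact h'])
      exact ⟨c :: a, b, by simp [hab], by simp [hna, Ne.symm hc]⟩

-- ===== replace: accumulator / fuel normalization and a head recurrence =====
theorem pv_replace_go_acc (old new : List Char) (fuel : Nat) :
    ∀ (l acc : List Char),
    PySem.Chars.replace.go old new fuel l acc = acc.reverse ++ PySem.Chars.replace.go old new fuel l [] := by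
  induction fuel with
  | zero => intro l acc; simp [PySem.Chars.replace.go]
  | succ fuel ih =>
    intro l acc
    cases l with
    | nil => simp [PySem.Chars.replace.go]
    | cons c t =>
      by_cases hp : old.isPrefixOf (c :: t)
      · simp only [PySem.Chars.replace.go, if_pos hp]
        rw [ih _ (new.reverse ++ acc), ih _ (new.reverse ++ [])]
        simp
      · simp only [PySem.Chars.replace.go, if_neg hp]
        rw [ih t (c :: acc), ih t [c]]
        simp

theorem pv_replace_go_fuel (old new : List Char) (hold : old ≠ []) :
    ∀ (n : Nat) (l : List Char) (fuel : Nat) (acc : List Char), l.length ≤ n → l.length ≤ fuel →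
    PySem.Chars.replace.go old new fuel l acc = PySem.Chars.replace.go old new l.length l acc := by
  have hone : 1 ≤ old.length := by
    cases old with | nil => exact absurd rfl hold | cons _ _ => simp
  intro n
  induction n with
  | zero =>
    intro l fuel acc hn _
    have : l = [] := List.eq_nil_of_length_eq_zero (by omega)
    subst this
    cases fuel <;> simp [PySem.Chars.replace.go]
  | succ n ih =>
    intro l fuel acc hn hf
    cases l with
    | nil => cases fuel <;> simp [PySem.Chars.replace.go]
    | cons c t =>
      obtain ⟨f, rfl⟩ : ∃ f, fuel = f + 1 := ⟨fuel - 1, by simp at hf; omega⟩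
      have ht : t.length ≤ n := by simpa using hn
      have htf : t.length ≤ f := by simpa using hf
      by_cases hp : old.isPrefixOf (c :: t)
      · have hdl : (List.drop old.length (c :: t)).length ≤ t.length := by
          simp only [List.length_drop, List.length_cons]; omega
        simp only [List.length_cons, PySem.Chars.replace.go, if_pos hp]
        rw [ih _ f _ (hdl.trans ht) (hdl.trans htf),
          ih _ t.length _ (hdl.trans ht) hdl]
      · simp only [List.length_cons, PySem.Chars.replace.go, if_neg hp]
        rw [ih t f _ ht htf, ih t t.length _ ht le_rfl]

theorem pv_replace_nil (old new : List Char) (hold : old ≠ []) :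
    PySem.Chars.replace [] old new = [] := by
  have : old.isEmpty = false := by cases old with | nil => exact absurd rfl hold | cons _ _ => rfl
  simp [PySem.Chars.replace, this, PySem.Chars.replace.go]

theorem pv_replace_cons (old new : List Char) (hold : old ≠ []) (c : Char) (t : List Char) :
    PySem.Chars.replace (c :: t) old new =
      if old.isPrefixOf (c :: t) then
        new ++ PySem.Chars.replace (List.drop old.length (c :: t)) old new
      else c :: PySem.Chars.replace t old new := by
  have hone : 1 ≤ old.length := by
    cases old with | nil => exact absurd rfl hold | cons _ _ => simp
  have hemp : old.isEmpty = false := by cases old with | nil => exact absurd rfl hold | cons _ _ => rfl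
  simp only [PySem.Chars.replace, hemp, Bool.false_eq_true, if_false]
  by_cases hp : old.isPrefixOf (c :: t)
  · have hdl : (List.drop old.length (c :: t)).length ≤ t.length := by
      simp only [List.length_drop, List.length_cons]; omega
    simp only [List.length_cons, PySem.Chars.replace.go, if_pos hp]
    rw [pv_replace_go_acc, pv_replace_go_fuel old new hold t.length _ t.length _ hdl hdl]
    simp
  · simp only [List.length_cons, PySem.Chars.replace.go, if_neg hp]
    rw [pv_replace_go_acc]
    simp

-- no match can span a '\n', so replace distributes over a '\n' boundary
theorem pv_replace_append_nl (old new : List Char) (hold : old ≠ []) (hnl : '\n' ∉ old) :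
    ∀ (n : Nat) (a : List Char), a.length ≤ n → ∀ (b : List Char),
    PySem.Chars.replace (a ++ '\n' :: b) old new =
      PySem.Chars.replace a old new ++ '\n' :: PySem.Chars.replace b old new := by
  have hone : 1 ≤ old.length := by
    cases old with | nil => exact absurd rfl hold | cons _ _ => simp
  have hnp : ∀ b : List Char, old.isPrefixOf ('\n' :: b) = false := by
    intro b
    cases old with
    | nil => exact absurd rfl hold
    | cons o os =>
      by_contra hx
      have hx' : o = '\n' ∧ os <+: b := by simpa using hx
      exact hnl (hx'.1 ▸ List.mem_cons_self)
  intro n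
  induction n with
  | zero =>
    intro a ha b
    have : a = [] := List.eq_nil_of_length_eq_zero (by omega)
    subst this
    rw [pv_replace_nil old new hold, List.nil_append, pv_replace_cons old new hold]
    simp [hnp b]
  | succ n ih =>
    intro a ha b
    cases a with
    | nil =>
      rw [pv_replace_nil old new hold, List.nil_append, pv_replace_cons old new hold]
      simp [hnp b]
    | cons c t =>
      have hcast : old.isPrefixOf (c :: (t ++ '\n' :: b)) = old.isPrefixOf (c :: t) := by
        by_cases hp : old.isPrefixOf (c :: t)
        · simp only [hp]
          exact List.isPrefixOf_iff_prefix.mpr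
            ((List.isPrefixOf_iff_prefix.mp hp).trans
              (by simpa using List.prefix_append (c :: t) ('\n' :: b)))
        · simp only [hp]
          by_contra hx
          have hpre : old <+: (c :: t) ++ '\n' :: b := by simpa using hx
          by_cases hlen : old.length ≤ (c :: t).length
          · exact hp (List.isPrefixOf_iff_prefix.mpr
              (List.prefix_of_prefix_length_le hpre (List.prefix_append _ _) hlen))
          · -- old is longer than a, so its prefix copy contains the '\n'
            have hpre2 : (c :: t) ++ ['\n'] <+: c :: (t ++ '\n' :: b) := ⟨b, by simp⟩
            have hsub := List.prefix_of_prefix_length_le hpre2 hpre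
              (by simp at hlen ⊢; omega)
            exact hnl (hsub.sublist.subset (by simp))
      rw [List.cons_append, pv_replace_cons old new hold c (t ++ '\n' :: b),
        pv_replace_cons old new hold c t, hcast]
      by_cases hp : old.isPrefixOf (c :: t)
      · rw [if_pos hp, if_pos hp]
        have hlen : old.length ≤ (c :: t).length :=
          (List.isPrefixOf_iff_prefix.mp hp).length_le
        have hdrop : List.drop old.length (c :: (t ++ '\n' :: b)) =
            List.drop old.length (c :: t) ++ '\n' :: b := by
          have he : c :: (t ++ '\n' :: b) = (c :: t) ++ '\n' :: b := rfl
          rw [he, List.drop_append_of_le_length hlen]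
        rw [hdrop, ih _ (by simp only [List.length_drop, List.length_cons]; simp at ha; omega) b]
        simp
      · rw [if_neg hp, if_neg hp]
        rw [ih t (by simpa using ha) b]
        simp

-- replace is a no-op when the pattern does not occur
theorem pv_replace_no_match (l old new : List Char) (h : PySem.Chars.isIn old l = false) :
    PySem.Chars.replace l old new = l := by
  have hni : ¬ old <:+: l := (PySem.Chars.isIn_eq_false_iff _ _).mp h
  have hold : old ≠ [] := by
    intro hx; subst hx; exact hni List.nil_infix
  clear h
  induction l with
  | nil => exact pv_replace_nil old new hold
  | cons c t ih =>
    have hp : old.isPrefixOf (c :: t) = false := by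
      by_contra hx
      exact hni (List.isPrefixOf_iff_prefix.mp (by simpa using hx)).isInfix
    have hnit : ¬ old <:+: t := fun hi => hni (hi.trans (List.suffix_cons c t).isInfix)
    rw [pv_replace_cons old new hold, if_neg (by simp [hp]), ih hnit]

theorem pv_str_replace_no_match (line pattern new : String)
    (h : PySem.Str.isIn pattern line = false) :
    PySem.Str.replace line pattern new = line := by
  apply String.toList_inj.mp
  rw [PySem.Str.toList_replace]
  rw [pv_replace_no_match line.toList pattern.toList new.toList (by simpa using h)]

-- ===== the three branch identities (Chars level) =====

-- truthy new_str, nonempty newline-free pattern: per-line replace joins to whole replace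
theorem pv_join_map_replace (old new : List Char) (hold : old ≠ []) (hnl : '\n' ∉ old) :
    ∀ (n : Nat) (s : List Char), s.length ≤ n →
    PySem.Chars.join ['\n'] ((pvSplit [] s).map (fun l => PySem.Chars.replace l old new)) =
      PySem.Chars.replace s old new := by
  intro n
  induction n with
  | zero =>
    intro s hs
    have : s = [] := List.eq_nil_of_length_eq_zero (by omega)
    subst this
    simp [pvSplit, PySem.Chars.join, List.intercalate]
  | succ n ih =>
    intro s hs
    by_cases hmem : '\n' ∈ s
    · obtain ⟨a, b, rfl, hna⟩ := pv_first_nl s hmem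
      rw [pvSplit_append_nl a b [] hna, List.map_cons]
      obtain ⟨y, ys, hy⟩ := List.exists_cons_of_ne_nil (pvSplit_ne_nil [] b)
      have hrec := ih b (by simp at hs; omega)
      rw [hy, List.map_cons] at hrec ⊢
      rw [pv_join_cons, hrec, pv_replace_append_nl old new hold hnl a.length a le_rfl b]
      simp
    · rw [pvSplit_of_no_nl [] s hmem, List.map_cons]
      simp [PySem.Chars.join, List.intercalate]

-- truthy new_str, empty pattern
theorem pv_join_map_replace_empty (new : List Char) :
    ∀ (n : Nat) (s : List Char), s.length ≤ n →
    PySem.Chars.join ['\n'] ((pvSplit [] s).map (fun l => PySem.Chars.replace l [] new)) =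
      PySem.Chars.replace s [] new := by
  intro n
  induction n with
  | zero =>
    intro s hs
    have : s = [] := List.eq_nil_of_length_eq_zero (by omega)
    subst this
    simp [pvSplit, PySem.Chars.join, List.intercalate]
  | succ n ih =>
    intro s hs
    by_cases hmem : '\n' ∈ s
    · obtain ⟨a, b, rfl, hna⟩ := pv_first_nl s hmem
      rw [pvSplit_append_nl a b [] hna, List.map_cons]
      obtain ⟨y, ys, hy⟩ := List.exists_cons_of_ne_nil (pvSplit_ne_nil [] b)
      have hrec := ih b (by simp at hs; omega)
      rw [hy, List.map_cons] at hrec ⊢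
      rw [pv_join_cons, hrec]
      simp [PySem.Chars.replace]
    · rw [pvSplit_of_no_nl [] s hmem, List.map_cons]
      simp [PySem.Chars.join, List.intercalate]

-- removal branch: B's partition loop computes the filtered split
theorem pv_dropWhile_append_nl (a b : List Char) (hna : '\n' ∉ a) :
    (a ++ '\n' :: b).dropWhile (fun c => decide (c ≠ '\n')) = '\n' :: b := by
  induction a with
  | nil => simp
  | cons c t ih =>
    have hc : ¬ c = '\n' := fun hh => hna (hh ▸ List.mem_cons_self)
    rw [List.cons_append, List.dropWhile_cons, if_pos (by simp [hc])]
    exact ih (fun hm => hna (List.mem_cons_of_mem _ hm))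

theorem pv_takeWhile_append_nl (a b : List Char) (hna : '\n' ∉ a) :
    (a ++ '\n' :: b).takeWhile (fun c => decide (c ≠ '\n')) = a := by
  induction a with
  | nil => simp
  | cons c t ih =>
    have hc : ¬ c = '\n' := fun hh => hna (hh ▸ List.mem_cons_self)
    rw [List.cons_append, List.takeWhile_cons, if_pos (by simp [hc])]
    rw [ih (fun hm => hna (List.mem_cons_of_mem _ hm))]

theorem pv_keptLines_eq (p : List Char) :
    ∀ (n : Nat) (rest : List Char), rest.length ≤ n → ∀ (out : List (List Char)),
    pvKeptLines p rest out = out ++ (pvSplit [] rest).filter (fun x => !PySem.Chars.isIn p x) := by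
  intro n
  induction n with
  | zero =>
    intro rest hr out
    have : rest = [] := List.eq_nil_of_length_eq_zero (by omega)
    subst this
    rw [pvKeptLines]
    simp only [List.takeWhile_nil, List.dropWhile_nil]
    simp [pvSplit, List.filter_cons]
    by_cases h : PySem.Chars.isIn p [] <;> simp [h]
  | succ n ih =>
    intro rest hr out
    rw [pvKeptLines]
    split
    next hd =>
      have hmem : '\n' ∉ rest := by
        intro hm
        obtain ⟨a, b, rfl, hna⟩ := pv_first_nl rest hm
        rw [pv_dropWhile_append_nl a b hna] at hd
        cases hd
      have hno : ∀ x ∈ rest, decide (x ≠ '\n') = true := by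
        intro x hx
        simp
        exact fun hh => hmem (hh ▸ hx)
      rw [List.takeWhile_eq_self_iff.mpr hno, pvSplit_of_no_nl [] rest hmem]
      simp only [List.reverse_nil, List.nil_append, List.filter_cons]
      by_cases h : PySem.Chars.isIn p rest <;> simp [h]
    next c tail hd =>
      have hmem : '\n' ∈ rest := by
        by_contra hno'
        have hno : ∀ x ∈ rest, decide (x ≠ '\n') = true := by
          intro x hx
          simp
          exact fun hh => hno' (hh ▸ hx)
        rw [List.dropWhile_eq_nil_iff.mpr hno] at hd
        cases hd
      obtain ⟨a, b, hab, hna⟩ := pv_first_nl rest hmem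
      subst hab
      rw [pv_dropWhile_append_nl a b hna] at hd
      injection hd with h1 h2
      subst h1; subst h2
      rw [pv_takeWhile_append_nl a b hna]
      have hb : b.length ≤ n := by simp at hr; omega
      rw [ih b hb _, pvSplit_append_nl a b [] hna]
      simp only [List.reverse_nil, List.nil_append, List.filter_cons]
      by_cases h : PySem.Chars.isIn p a <;> simp [h, List.append_assoc]

-- ===== A-side loop characterizations =====
theorem pv_foldl_map (pattern new_str : String) (hns : new_str ≠ "")
    (lines keep : List String) :
    lines.foldl (fun keep line =>
      if PySem.Str.isIn pattern line then
        if new_str ≠ "" then keep ++ [PySem.Str.replace line pattern new_str] else keep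
      else keep ++ [line]) keep
    = keep ++ lines.map (fun line => PySem.Str.replace line pattern new_str) := by
  induction lines generalizing keep with
  | nil => simp
  | cons l t ih =>
    rw [List.foldl_cons, List.map_cons]
    by_cases hin : PySem.Str.isIn pattern l = true
    · rw [if_pos hin, if_pos hns, ih]
      simp
    · rw [if_neg hin, ih, pv_str_replace_no_match l pattern new_str (by simpa using hin)]
      simp
  
theorem pv_foldl_filter (pattern new_str : String) (hns : ¬ new_str ≠ "")
    (lines keep : List String) :
    lines.foldl (fun keep line =>
      if PySem.Str.isIn pattern line then
        if new_str ≠ "" then keep ++ [PySem.Str.replace line pattern new_str] else keep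
      else keep ++ [line]) keep
    = keep ++ lines.filter (fun line => !PySem.Str.isIn pattern line) := by
  induction lines generalizing keep with
  | nil => simp
  | cons l t ih =>
    rw [List.foldl_cons, List.filter_cons]
    by_cases hin : PySem.Str.isIn pattern l = true
    · rw [if_pos hin, if_neg hns, ih,
        if_neg (show ¬(!PySem.Str.isIn pattern l) = true by simpa using hin)]
    · rw [if_neg hin, ih,
        if_pos (show (!PySem.Str.isIn pattern l) = true by simpa using hin)]
      simp

theorem pv_foldl_keep_all (pattern new_str : String) (lines keep : List String)
    (hall : ∀ l ∈ lines, PySem.Str.isIn pattern l = false) :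
    lines.foldl (fun keep line =>
      if PySem.Str.isIn pattern line then
        if new_str ≠ "" then keep ++ [PySem.Str.replace line pattern new_str] else keep
      else keep ++ [line]) keep
    = keep ++ lines := by
  induction lines generalizing keep with
  | nil => simp
  | cons l t ih =>
    rw [List.foldl_cons, if_neg (by simp only [hall l List.mem_cons_self]; simp),
      ih _ (fun x hx => hall x (List.mem_cons_of_mem _ hx))]
    simp

-- Str-level glue: joining ofList-mapped parts is ofList of the Chars-level join
theorem pv_str_join_ofList (Y : List (List Char)) :
    PySem.Str.join "\n" (Y.map String.ofList) = String.ofList (PySem.Chars.join ['\n'] Y) := by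
  simp only [PySem.Str.join]
  rw [(by decide : ("\n" : String).toList = ['\n'])]
  congr 1
  rw [List.map_map]
  simp [Function.comp_def]

-- ===== VERDICT (by name: the statement is the Claim_ definition above) =====
theorem replace_or_remove_line_spec : Claim_equal_replace_or_remove_line := by
  intro s pattern new_str _
  simp only [Spec_replace_or_remove_line, replace_or_remove_line, replace_or_remove_line_alt]
  have hsplit : (PySem.Str.split? s "\n").getD [] = (pvSplit [] s.toList).map String.ofList := by
    simp only [PySem.Str.split?, PySem.Chars.split?]
    rw [(by decide : ("\n" : String).toList = ['\n'])]
    simp [pv_split_eq]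
  rw [hsplit]
  by_cases h1 : PySem.Str.isIn "\n" pattern = true
  · -- pattern contains a newline: no line matches, A keeps every line, B returns s
    rw [if_pos h1]
    have hmem : '\n' ∈ pattern.toList := by
      have hinf := (PySem.Str.isIn_iff_infix _ _).mp h1
      obtain ⟨u, v, huv⟩ := (by simpa using hinf : ['\n'] <:+: pattern.toList)
      rw [← huv]
      simp
    have hall : ∀ l ∈ (pvSplit [] s.toList).map String.ofList,
        PySem.Str.isIn pattern l = false := by
      intro l hl
      obtain ⟨x, hx, rfl⟩ := List.mem_map.mp hl
      by_contra hbad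
      have hb : PySem.Chars.isIn pattern.toList x = true := by simpa using hbad
      have hinf := (PySem.Chars.isIn_iff_infix _ _).mp hb
      exact pvSplit_no_nl [] s.toList (by simp) x hx (hinf.subset hmem)
    rw [pv_foldl_keep_all pattern new_str _ [] hall, List.nil_append,
      pv_str_join_ofList, pv_join_pvSplit s.toList []]
    simp
  · rw [if_neg h1]
    have hnl : '\n' ∉ pattern.toList := by
      intro hmem
      obtain ⟨u, v, huv⟩ := List.append_of_mem hmem
      exact h1 ((PySem.Str.isIn_iff_infix _ _).mpr (by rw [(by decide : ("\n" : String).toList = ['\n'])]; exact ⟨u, v, by simp [huv]⟩))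
    by_cases hns : new_str ≠ ""
    · -- whole-string replace
      rw [if_pos hns, pv_foldl_map pattern new_str hns _ [], List.nil_append, List.map_map]
      rw [List.map_congr_left (g := String.ofList ∘
          fun l => PySem.Chars.replace l pattern.toList new_str.toList)
        (fun x _ => by simp [Function.comp, PySem.Str.replace])]
      rw [← List.map_map, pv_str_join_ofList]
      have hB : PySem.Str.replace s pattern new_str =
          String.ofList (PySem.Chars.replace s.toList pattern.toList new_str.toList) := by
        simp [PySem.Str.replace]
      rw [hB]
      congr 1
      by_cases hp : pattern.toList = []
      · rw [hp]
        exact pv_join_map_replace_empty new_str.toList s.toList.length s.toList le_rfl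
      · exact pv_join_map_replace pattern.toList new_str.toList hp hnl s.toList.length s.toList le_rfl
    · -- removal branch
      rw [if_neg hns, pv_foldl_filter pattern new_str hns _ [], List.nil_append]
      rw [pv_keptLines_eq pattern.toList s.toList.length s.toList le_rfl [], List.nil_append]
      rw [List.filter_map]
      rw [List.filter_congr (q := fun x => !PySem.Chars.isIn pattern.toList x)
        (fun x _ => by simp)]
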